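-- pv_equiv track=rewrite | github.com/jhw/strudelbreaks | app/export/octatrack/ot_doom/render.py | _split_into_banks
-- ===== SOURCE A (Python) =====
-- def _split_into_banks(rows, patterns_per_bank):
--     """Group rows into banks. A new bank starts when (a) the current
--     bank is full, or (b) the next row's |C| differs from the bank's
--     leading |C|. Mixed-|C|-within-a-bank is rejected downstream by
--     render_bank, so this packer keeps banks uniform up-front.
--     """
--     banks = []
--     current = []
--     current_n = None
--     for row in rows:
--         n = len(row)
--         if current and (n != current_n or len(current) >= patterns_per_bank):
--             banks.append(current)
--             current = []
--             current_n = None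
--         if not current:
--             current_n = n
--         current.append(row)
--     if current:
--         banks.append(current)
--     return banks
-- ===== SOURCE B (Python) =====
-- def _chunks(run, size):
--     out = []
--     while run:
--         out.append(run[:size])
--         run = run[size:]
--     return out
--
--
-- def _split_into_banks(rows, patterns_per_bank):
--     size = patterns_per_bank if patterns_per_bank >= 1 else 1
--     banks = []
--     rest = rows
--     while rest:
--         w = len(rest[0])
--         j = 1
--         while j < len(rest) and len(rest[j]) == w:
--             j += 1
--         banks.extend(_chunks(rest[:j], size))
--         rest = rest[j:]
--     return banks
-- ===== Notes on version B (the rewrite author's own statement) =====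
-- stated objective: simpler
-- what changed: Replaces A's single-pass three-variable state machine (banks/current/current_n with flush conditions) by an explicit decomposition: find each maximal run of equal-width rows, then slice it into fixed-size chunks with a small helper; patterns_per_bank <= 0 naturally degenerates to chunk size 1.
import Mathlib
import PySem

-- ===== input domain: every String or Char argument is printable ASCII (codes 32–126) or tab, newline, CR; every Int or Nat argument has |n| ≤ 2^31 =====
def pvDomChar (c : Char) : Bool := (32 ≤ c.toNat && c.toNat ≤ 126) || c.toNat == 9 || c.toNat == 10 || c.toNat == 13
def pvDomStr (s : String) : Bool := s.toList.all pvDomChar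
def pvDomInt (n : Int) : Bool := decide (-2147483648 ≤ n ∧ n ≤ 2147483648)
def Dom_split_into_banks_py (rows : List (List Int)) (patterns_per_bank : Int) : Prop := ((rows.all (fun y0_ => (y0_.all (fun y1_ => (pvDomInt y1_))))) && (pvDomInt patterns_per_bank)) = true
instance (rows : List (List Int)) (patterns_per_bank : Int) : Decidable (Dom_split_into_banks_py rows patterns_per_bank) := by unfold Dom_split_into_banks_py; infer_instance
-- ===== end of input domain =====

-- B replaces A's one-pass state machine by an explicit run-finding loop (maximal runs of
-- equal-width rows) plus a slice-based chunk helper; objective: simpler decomposition.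


-- ===== PORT A =====
-- one step of A's for-loop over rows; state = (banks, current, current_n)
def pyStepA (ppb : Int) (st : List (List (List Int)) × List (List Int) × Option Int)
    (row : List Int) : List (List (List Int)) × List (List Int) × Option Int :=
  let banks := st.1
  let current := st.2.1
  let current_n := st.2.2
  let n : Int := row.length
  let (banks, current, current_n) :=
    if current ≠ [] ∧ (some n ≠ current_n ∨ (current.length : Int) ≥ ppb) then
      (banks ++ [current], ([] : List (List Int)), (none : Option Int))
    else (banks, current, current_n)
  let current_n := if current = [] then some n else current_n
  (banks, current ++ [row], current_n)

def split_into_banks_py (rows : List (List Int)) (patterns_per_bank : Int) :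
    List (List (List Int)) :=
  let st := rows.foldl (pyStepA patterns_per_bank) ([], [], none)
  if st.2.1 ≠ [] then st.1 ++ [st.2.1] else st.1

-- ===== PORT B =====
-- Source B's _chunks: peel run[:size] off the front until empty (size ≥ 1 at every call site)
def pyChunks (size : Nat) : List (List Int) → List (List (List Int))
  | [] => []
  | x :: xs => (x :: xs.take (size - 1)) :: pyChunks size (xs.drop (size - 1))
  termination_by l => l.length
  decreasing_by simp [List.length_drop]

-- Source B's outer while-loop: take the maximal run of rows of the leading width, chunk it, recurse
def pyGoB (size : Nat) : List (List Int) → List (List (List Int))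
  | [] => []
  | r :: rest =>
    pyChunks size (r :: rest.takeWhile (fun x => x.length == r.length)) ++
      pyGoB size (rest.dropWhile (fun x => x.length == r.length))
  termination_by l => l.length
  decreasing_by
    simp only [List.length_cons]
    exact Nat.lt_succ_of_le (List.length_dropWhile_le _ _)

def split_into_banks_py_alt (rows : List (List Int)) (patterns_per_bank : Int) :
    List (List (List Int)) :=
  let size : Nat := (if patterns_per_bank ≥ 1 then patterns_per_bank else 1).toNat
  pyGoB size rows

-- ===== PRECONDITION & SPEC =====
def Spec_split_into_banks_py (rows : List (List Int)) (patterns_per_bank : Int) (out : List (List (List Int))) : Prop := out = split_into_banks_py_alt rows patterns_per_bank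
instance (rows : List (List Int)) (patterns_per_bank : Int) (out : List (List (List Int))) : Decidable (Spec_split_into_banks_py rows patterns_per_bank out) := by unfold Spec_split_into_banks_py; infer_instance

-- ===== CLAIM (what is proved, stated in full; the proofs are below) =====
def Claim_equal_split_into_banks_py : Prop := ∀ (rows : List (List Int)) (patterns_per_bank : Int), Dom_split_into_banks_py rows patterns_per_bank → Spec_split_into_banks_py rows patterns_per_bank (split_into_banks_py rows patterns_per_bank)

-- ===== LEMMAS AND PROOFS =====

-- the effective bank size: ppb when ppb ≥ 1, else 1
def pvSz (ppb : Int) : Nat := (if ppb ≥ 1 then ppb else 1).toNat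

theorem pvSz_pos (ppb : Int) : 1 ≤ pvSz ppb := by
  unfold pvSz; split_ifs with h <;> omega

-- A's flush test on a same-width row equals "current is full", given 1 ≤ c ≤ sz
theorem pv_flush_iff (ppb : Int) (c : Nat) (h1 : 1 ≤ c) (h2 : c ≤ pvSz ppb) :
    ((c : Int) ≥ ppb ↔ c = pvSz ppb) := by
  unfold pvSz at *
  split_ifs at * with h <;> omega

theorem pyChunks_short (size : Nat) (cur : List (List Int)) (hne : cur ≠ [])
    (hle : cur.length ≤ size) : pyChunks size cur = [cur] := by
  cases cur with
  | nil => simp at hne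
  | cons a t =>
    simp only [List.length_cons] at hle
    simp only [pyChunks]
    rw [List.take_of_length_le (show t.length ≤ size - 1 by omega),
        List.drop_of_length_le (show t.length ≤ size - 1 by omega)]
    simp only [pyChunks]

theorem pyChunks_full (size : Nat) (cur m : List (List Int)) (hlen : cur.length = size)
    (hs : 1 ≤ size) :
    pyChunks size (cur ++ m) = cur :: pyChunks size m := by
  cases cur with
  | nil => simp at hlen; omega
  | cons a t =>
    simp only [List.length_cons] at hlen
    rw [List.cons_append]
    simp only [pyChunks]
    rw [List.take_append_of_le_length (by omega), List.drop_append_of_le_length (by omega)]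
    rw [List.take_of_length_le (by omega), List.drop_of_length_le (by omega)]
    simp

-- the fold over a uniform-width run, starting from a nonempty partial bank
theorem pv_run_lemma (ppb : Int) (n : Int) :
    ∀ (run : List (List Int)) (banks : List (List (List Int))) (cur : List (List Int)),
      cur ≠ [] → cur.length ≤ pvSz ppb → (∀ x ∈ run, (x.length : Int) = n) →
      let st := run.foldl (pyStepA ppb) (banks, cur, some n)
      st.2.1 ≠ [] ∧ st.2.1.length ≤ pvSz ppb ∧ st.2.2 = some n ∧
        st.1 ++ [st.2.1] = banks ++ pyChunks (pvSz ppb) (cur ++ run) := by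
  intro run
  induction run with
  | nil =>
    intro banks cur hne hle _
    refine ⟨hne, hle, rfl, ?_⟩
    simp [pyChunks_short _ cur hne hle]
  | cons x run' ih =>
    intro banks cur hne hle hall
    have hx : (x.length : Int) = n := hall x (by simp)
    have hrun' : ∀ y ∈ run', (y.length : Int) = n := fun y hy => hall y (by simp [hy])
    have hcpos : 1 ≤ cur.length := List.length_pos_iff.mpr hne
    simp only [List.foldl_cons]
    by_cases hfl : (cur.length : Int) ≥ ppb
    · -- flush: current is full
      have hfull : cur.length = pvSz ppb := (pv_flush_iff ppb cur.length hcpos hle).mp hfl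
      have hstep : pyStepA ppb (banks, cur, some n) x = (banks ++ [cur], [x], some n) := by
        simp [pyStepA, hne, hfl, hx]
      rw [hstep]
      have := ih (banks ++ [cur]) [x] (by simp) (by simpa using pvSz_pos ppb) hrun'
      refine ⟨this.1, this.2.1, this.2.2.1, ?_⟩
      rw [this.2.2.2]
      rw [pyChunks_full (pvSz ppb) cur (x :: run') hfull (pvSz_pos ppb)]
      simp
    · -- no flush: append to current
      have hstep : pyStepA ppb (banks, cur, some n) x = (banks, cur ++ [x], some n) := by
        simp [pyStepA, hne, hfl, hx]
      rw [hstep]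
      have hlt : cur.length < pvSz ppb := by
        rcases lt_or_eq_of_le hle with h | h
        · exact h
        · exact absurd ((pv_flush_iff ppb cur.length hcpos hle).mpr h) hfl
      have := ih banks (cur ++ [x]) (by simp) (by simp; omega) hrun'
      refine ⟨this.1, this.2.1, this.2.2.1, ?_⟩
      rw [this.2.2.2]
      simp

-- the whole loop, from a fresh (empty-current) state
theorem pv_main (ppb : Int) :
    ∀ (N : Nat) (rows : List (List Int)) (banks : List (List (List Int))), rows.length ≤ N →
      (let st := rows.foldl (pyStepA ppb) (banks, [], none)
       if st.2.1 ≠ [] then st.1 ++ [st.2.1] else st.1) = banks ++ pyGoB (pvSz ppb) rows := by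
  intro N
  induction N with
  | zero =>
    intro rows banks hlen
    have : rows = [] := List.eq_nil_of_length_eq_zero (Nat.le_zero.mp hlen)
    subst this; simp [pyGoB]
  | succ N' ih =>
    intro rows banks hlen
    cases rows with
    | nil => simp [pyGoB]
    | cons r rest =>
      simp only [List.foldl_cons]
      have hstep0 : pyStepA ppb (banks, [], none) r = (banks, [r], some (r.length : Int)) := by
        simp [pyStepA]
      rw [hstep0]
      set P : List Int → Bool := fun x => x.length == r.length with hP
      have hsplit : rest = rest.takeWhile P ++ rest.dropWhile P := (List.takeWhile_append_dropWhile).symm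
      rw [show rest.foldl (pyStepA ppb) (banks, [r], some (r.length : Int))
            = (rest.dropWhile P).foldl (pyStepA ppb)
                ((rest.takeWhile P).foldl (pyStepA ppb) (banks, [r], some (r.length : Int))) by
        conv_lhs => rw [hsplit]
        rw [List.foldl_append]]
      have hall : ∀ x ∈ rest.takeWhile P, (x.length : Int) = (r.length : Int) := by
        intro x hx
        have hpx : P x = true := List.mem_takeWhile_imp hx
        simp [hP] at hpx
        exact_mod_cast hpx
      obtain ⟨h1, h2, h3, h4⟩ := pv_run_lemma ppb (r.length : Int) (rest.takeWhile P) banks [r]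
          (by simp) (by simpa using pvSz_pos ppb) hall
      set st₁ := (rest.takeWhile P).foldl (pyStepA ppb) (banks, [r], some (r.length : Int)) with hst₁
      have hgo : pyGoB (pvSz ppb) (r :: rest)
          = pyChunks (pvSz ppb) (r :: rest.takeWhile P) ++ pyGoB (pvSz ppb) (rest.dropWhile P) := by
        rw [pyGoB]
      cases hdw : rest.dropWhile P with
      | nil =>
        simp only [List.foldl_nil]
        rw [if_pos h1, h4, hgo, hdw]
        simp [pyGoB]
      | cons y rest'' =>
        have hy : P y = false := by
          have := List.head?_dropWhile_not P rest
          rw [hdw] at this; simpa using this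
        have hyn : (y.length : Int) ≠ (r.length : Int) := by
          simp [hP] at hy
          exact_mod_cast fun h => hy (by exact_mod_cast h)
        simp only [List.foldl_cons]
        have hstepy : pyStepA ppb st₁ y = (st₁.1 ++ [st₁.2.1], [y], some (y.length : Int)) := by
          obtain ⟨b₁, c₁, m₁⟩ := st₁
          simp only at h1 h3
          subst h3
          have hynn : ¬ (y.length = r.length) := fun h => hyn (by exact_mod_cast h)
          simp [pyStepA, h1, hynn]
        rw [hstepy]
        have hrec : (let st := (y :: rest'').foldl (pyStepA ppb) (st₁.1 ++ [st₁.2.1], [], none)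
            if st.2.1 ≠ [] then st.1 ++ [st.2.1] else st.1)
            = (st₁.1 ++ [st₁.2.1]) ++ pyGoB (pvSz ppb) (y :: rest'') := by
          apply ih
          have hd : (rest.dropWhile P).length ≤ rest.length := List.length_dropWhile_le _ _
          rw [hdw] at hd
          simp only [List.length_cons] at hlen hd ⊢
          omega
        simp only [List.foldl_cons] at hrec
        have hstepy' : pyStepA ppb (st₁.1 ++ [st₁.2.1], [], none) y
            = (st₁.1 ++ [st₁.2.1], [y], some (y.length : Int)) := by
          simp [pyStepA]
        rw [hstepy'] at hrec
        rw [hrec, h4, hgo, hdw]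
        simp

-- ===== VERDICT (by name: the statement is the Claim_ definition above) =====
theorem split_into_banks_py_spec : Claim_equal_split_into_banks_py := by
  intro rows ppb _
  unfold Spec_split_into_banks_py split_into_banks_py split_into_banks_py_alt
  have := pv_main ppb rows.length rows [] (le_refl _)
  simpa [pvSz] using this
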